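-- pv_equiv track=rewrite | github.com/LCAI-TIHU/SW | firmware/scripts/esdk-settings-generator/generate_settings.py | get_greatest_common_arch
-- ===== SOURCE A (Python) =====
-- def get_greatest_common_arch(archs):
--     """Get the RISC-V ISA string which contains as many extensions as are supported
--        by all harts in the design"""
--     if len(archs) == 1:
--         return archs[0]
--
--     # Get all ISA extensions implemented by any hart
--     extensions = ''.join(set(''.join([arch[4:] for arch in archs])))
--
--     # Get a list of any extensions which aren't supported by all harts
--     disallowed_extensions = ""
--     for extension in extensions:
--         if not all([extension in arch[4:] for arch in archs]):
--             disallowed_extensions += extension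
--
--     # Get the longest arch from the list
--     arch = max(archs, key=len)
--
--     # Filter out any disallowed extensions
--     for extension in disallowed_extensions:
--         base = arch[:4]
--         extensions = arch[4:].replace(extension, "")
--         arch = base + extensions
--
--     return arch
-- ===== SOURCE B (Python) =====
-- def get_greatest_common_arch(archs):
--     """Get the RISC-V ISA string which contains as many extensions as are supported
--        by all harts in the design"""
--     # Extensions supported by every hart = intersection of each hart's extension set
--     common = set.intersection(*(set(arch[4:]) for arch in archs))
--     longest = max(archs, key=len)
--     return longest[:4] + ''.join(c for c in longest[4:] if c in common)
-- ===== Notes on version B (the rewrite author's own statement) =====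
-- stated objective: simpler
-- what changed: Replaces A's union-of-all-extensions scan, the disallowed-extension accumulation loop and the repeated str.replace rewrites of the chosen arch by one set intersection across harts followed by a single filtering pass over the longest arch's tail (the len==1 special case disappears as well).
import Mathlib
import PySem

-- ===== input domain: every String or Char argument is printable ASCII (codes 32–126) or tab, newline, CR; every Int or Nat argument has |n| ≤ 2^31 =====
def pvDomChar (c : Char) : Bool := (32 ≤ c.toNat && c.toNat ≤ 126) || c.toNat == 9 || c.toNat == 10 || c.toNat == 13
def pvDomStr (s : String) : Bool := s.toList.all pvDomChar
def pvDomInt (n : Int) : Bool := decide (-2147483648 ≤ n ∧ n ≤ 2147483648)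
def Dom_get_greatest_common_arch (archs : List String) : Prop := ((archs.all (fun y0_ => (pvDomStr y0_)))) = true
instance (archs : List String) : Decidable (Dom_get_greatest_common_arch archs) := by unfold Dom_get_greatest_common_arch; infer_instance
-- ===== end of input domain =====

-- B replaces A's union scan + disallowed-accumulation loop + repeated replace by one
-- intersection of per-hart extension sets and a single filtering pass (objective: simpler).

-- ===== PORT A =====
def get_greatest_common_arch (archs : List String) : String :=
  if PySem.List.len archs == 1 then
    PySem.List.pyGetD archs 0 ""            -- archs[0]; in range since len == 1
  else
    -- extensions = ''.join(set(''.join([arch[4:] for arch in archs])))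
    let extensions : List Char :=
      PySem.Set.ofList (PySem.Chars.join [] (archs.map (fun a => PySem.List.slice a.toList (some 4) none)))
    -- for extension in extensions: if not all(...): disallowed += extension
    let disallowed : List Char := extensions.foldl
      (fun d e =>
        if !(archs.all (fun a => PySem.Chars.isIn [e] (PySem.List.slice a.toList (some 4) none)))
        then d ++ [e] else d) []
    -- arch = max(archs, key=len)  (ValueError on []; excluded by Pre_)
    let arch0 : String := (PySem.List.max? archs (fun a => PySem.Str.len a)).getD ""
    -- for extension in disallowed: arch = arch[:4] + arch[4:].replace(extension, "")
    String.ofList (disallowed.foldl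
      (fun arch e =>
        PySem.List.slice arch none (some 4) ++
        PySem.Chars.replace (PySem.List.slice arch (some 4) none) [e] [])
      arch0.toList)

-- ===== PORT B =====
def get_greatest_common_arch_alt (archs : List String) : String :=
  -- common = set.intersection(*(set(arch[4:]) for arch in archs))  (TypeError on []; excluded by Pre_)
  match archs.map (fun a => PySem.Set.ofList (PySem.List.slice a.toList (some 4) none)) with
  | [] => ""
  | s :: rest =>
    let common : PySem.Set Char := rest.foldl PySem.Set.inter s
    -- longest = max(archs, key=len)
    let longest : List Char := ((PySem.List.max? archs (fun a => PySem.Str.len a)).getD "").toList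
    -- return longest[:4] + ''.join(c for c in longest[4:] if c in common)
    String.ofList (PySem.List.slice longest none (some 4) ++
      (PySem.List.slice longest (some 4) none).filter (fun c => common.contains c))

-- ===== PRECONDITION & SPEC =====
-- Pre_ excludes only the empty list, on which A raises ValueError (max of empty sequence).
def Pre_get_greatest_common_arch (archs : List String) : Prop := archs ≠ []
instance (archs : List String) : Decidable (Pre_get_greatest_common_arch archs) := by
  unfold Pre_get_greatest_common_arch; infer_instance
def pvWitness_get_greatest_common_arch : List String := ["rv32imac", "rv32ima"]
def Spec_get_greatest_common_arch (archs : List String) (out : String) : Prop := out = get_greatest_common_arch_alt archs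
instance (archs : List String) (out : String) : Decidable (Spec_get_greatest_common_arch archs out) := by unfold Spec_get_greatest_common_arch; infer_instance

-- ===== CLAIM (what is proved, stated in full; the proofs are below) =====
def Claim_equal_get_greatest_common_arch : Prop := ∀ (archs : List String), Dom_get_greatest_common_arch archs → Pre_get_greatest_common_arch archs → Spec_get_greatest_common_arch archs (get_greatest_common_arch archs)

-- ===== LEMMAS AND PROOFS =====

-- replace.go with a single-char pattern and empty replacement filters that char out
lemma replace_go_filter (e : Char) :
    ∀ (l : List Char) (fuel : Nat) (acc : List Char), l.length ≤ fuel →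
      PySem.Chars.replace.go [e] [] fuel l acc = acc.reverse ++ l.filter (· ≠ e) := by
  intro l
  induction l with
  | nil => intro fuel acc _; cases fuel <;> simp [PySem.Chars.replace.go]
  | cons c t ih =>
    intro fuel acc h
    cases fuel with
    | zero => simp at h
    | succ f =>
      simp only [PySem.Chars.replace.go]
      by_cases hc : e = c
      · subst hc
        simp [List.isPrefixOf, ih f acc (by simpa using h)]
      · have hpf : ([e].isPrefixOf (c :: t)) = false := by
          simp [List.isPrefixOf]
          exact hc
        simp only [hpf, Bool.false_eq_true, if_false]
        rw [ih f (c :: acc) (by simpa using h)]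
        simp [List.filter_cons]
        exact fun h' => hc h'.symm

lemma replace_single (cs : List Char) (e : Char) :
    PySem.Chars.replace cs [e] [] = cs.filter (· ≠ e) := by
  simp [PySem.Chars.replace, replace_go_filter e cs cs.length [] (le_refl _)]

lemma join_nil_flatten (parts : List (List Char)) :
    PySem.Chars.join [] parts = parts.flatten := by
  induction parts with
  | nil => simp [PySem.Chars.join_nil]
  | cons p ps ih =>
    cases ps with
    | nil => simp [PySem.Chars.join_singleton]
    | cons q qs => rw [PySem.Chars.join_cons_cons]; simp_all

-- membership in the folded intersection of sets
lemma mem_foldl_inter (rest : List (PySem.Set Char)) :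
    ∀ (s : PySem.Set Char) (c : Char),
      c ∈ rest.foldl PySem.Set.inter s ↔ c ∈ s ∧ ∀ t ∈ rest, c ∈ t := by
  induction rest with
  | nil => intro s c; simp
  | cons t ts ih =>
    intro s c
    simp [List.foldl_cons, ih, PySem.Set.mem_inter]
    tauto

-- A's final loop: stripping each disallowed char from the tail = filtering the tail
lemma foldA (D : List Char) :
    ∀ (base r : List Char), base.length ≤ 4 → (base.length = 4 ∨ r = []) →
      D.foldl (fun arch e =>
          PySem.List.slice arch none (some 4) ++
          PySem.Chars.replace (PySem.List.slice arch (some 4) none) [e] []) (base ++ r)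
      = base ++ r.filter (fun c => !D.contains c) := by
  induction D with
  | nil => intro base r _ _; simp
  | cons e D ih =>
    intro base r hle hcase
    have hslice : ∀ (x : List Char), PySem.List.slice x none (some 4) = x.take 4 ∧
        PySem.List.slice x (some 4) none = x.drop 4 := by
      intro x
      constructor
      · simp [pysem]
      · simp [pysem]
    rcases hcase with h4 | hr
    · -- base has length exactly 4: the slices split cleanly
      have hstep : (PySem.List.slice (base ++ r) none (some 4) ++
          PySem.Chars.replace (PySem.List.slice (base ++ r) (some 4) none) [e] [])
          = base ++ r.filter (· ≠ e) := by
        have ht : List.take 4 (base ++ r) = base := by rw [← h4]; exact List.take_left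
        have hd : List.drop 4 (base ++ r) = r := by rw [← h4]; exact List.drop_left
        rw [(hslice (base ++ r)).1, (hslice (base ++ r)).2, ht, hd, replace_single]
      rw [List.foldl_cons, hstep, ih base (r.filter (· ≠ e)) hle (Or.inl h4)]
      congr 1
      rw [List.filter_filter]
      apply List.filter_congr
      intro c _
      by_cases hce : c = e <;> simp [hce]
    · -- base shorter than 4 (so the whole arch): the tail is empty and stays empty
      subst hr
      have hstep : (PySem.List.slice (base ++ []) none (some 4) ++
          PySem.Chars.replace (PySem.List.slice (base ++ []) (some 4) none) [e] [])
          = base ++ [] := by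
        rw [(hslice (base ++ [])).1, (hslice (base ++ [])).2]
        simp [List.take_of_length_le (by simpa using hle), List.drop_eq_nil_of_le (by simpa using hle),
              replace_single]
      rw [List.foldl_cons, hstep, ih base [] hle (Or.inr rfl)]
      simp

-- ===== VERDICT (by name: the statement is the Claim_ definition above) =====
-- single-char membership test of A's 'extension in arch[4:]'
lemma isIn_singleton (c : Char) (t : List Char) : PySem.Chars.isIn [c] t = true ↔ c ∈ t := by
  rw [PySem.Chars.isIn_iff_infix]; exact List.singleton_infix_iff c t

set_option maxHeartbeats 1000000 in
theorem get_greatest_common_arch_spec : Claim_equal_get_greatest_common_arch := by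
  intro archs _ hpre
  unfold Spec_get_greatest_common_arch
  -- the longest arch, chosen identically by both ports
  obtain ⟨m, hm⟩ : ∃ m, PySem.List.max? archs (fun a => PySem.Str.len a) = some m := by
    cases h : PySem.List.max? archs (fun a => PySem.Str.len a) with
    | none => exact absurd ((PySem.List.max?_eq_none_iff _ _).mp h) hpre
    | some m => exact ⟨m, rfl⟩
  have hmem : m ∈ archs := PySem.List.max?_mem hm
  -- B's common set contains c iff every hart's tail contains c
  have hcommon : ∀ (s0 : PySem.Set Char) (ss : List (PySem.Set Char)) (c : Char),
      archs.map (fun a => PySem.Set.ofList (PySem.List.slice a.toList (some 4) none)) = s0 :: ss →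
      ((ss.foldl PySem.Set.inter s0).contains c = true ↔
        ∀ a ∈ archs, c ∈ PySem.List.slice a.toList (some 4) none) := by
    intro s0 ss c hmap
    rw [PySem.Set.contains_iff, mem_foldl_inter]
    constructor
    · rintro ⟨h0, hrest⟩ a ha
      have : PySem.Set.ofList (PySem.List.slice a.toList (some 4) none) ∈ s0 :: ss := by
        rw [← hmap]; exact List.mem_map_of_mem ha
      rcases List.mem_cons.mp this with h | h
      · rw [← h] at h0; exact (PySem.Set.mem_ofList _ _).mp h0
      · exact (PySem.Set.mem_ofList _ _).mp (hrest _ h)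
    · intro hall
      have hmem' : ∀ t ∈ s0 :: ss, c ∈ t := by
        intro t ht
        rw [← hmap] at ht
        obtain ⟨a, ha, rfl⟩ := List.mem_map.mp ht
        exact (PySem.Set.mem_ofList _ _).mpr (hall a ha)
      exact ⟨hmem' s0 (List.mem_cons_self ..), fun t ht => hmem' t (List.mem_cons_of_mem _ ht)⟩
  cases archs with
  | nil => exact absurd rfl hpre
  | cons a rest =>
  cases rest with
  | nil =>
    -- len(archs) == 1: A returns archs[0]; B filters the tail against its own set
    have hma : m = a := by simpa using List.eq_of_mem_singleton hmem
    subst hma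
    unfold get_greatest_common_arch get_greatest_common_arch_alt
    simp only [List.map_cons, List.map_nil, hm]
    have hlen : (PySem.List.len [m] == 1) = true := by simp [pysem]
    rw [if_pos hlen]
    have hfilter : (PySem.List.slice m.toList (some 4) none).filter
        (fun c => (PySem.Set.ofList (PySem.List.slice m.toList (some 4) none)).contains c) =
        PySem.List.slice m.toList (some 4) none := by
      apply List.filter_eq_self.mpr
      intro c hc
      rw [PySem.Set.contains_iff]
      exact (PySem.Set.mem_ofList _ _).mpr hc
    simp only [List.foldl_nil, Option.getD_some, hfilter]
    have : PySem.List.slice m.toList none (some 4) ++ PySem.List.slice m.toList (some 4) none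
        = m.toList := by simp [pysem]
    rw [this]
    simp [pysem]
  | cons b rest' =>
    unfold get_greatest_common_arch get_greatest_common_arch_alt
    have hlen : (PySem.List.len (a :: b :: rest') == 1) = false := by
      simp [pysem]; omega
    simp only [hlen, Bool.false_eq_true, if_false, List.map_cons, hm, Option.getD_some]
    congr 1
    -- disallowed = extensions filtered by "not supported by all harts"
    rw [show (fun (d : List Char) e =>
          if (!(a :: b :: rest').all fun x => PySem.Chars.isIn [e] (PySem.List.slice x.toList (some 4) none)) = true
          then d ++ [e] else d)
        = (fun (d : List Char) e =>
          if (fun e => !(a :: b :: rest').all fun x => PySem.Chars.isIn [e] (PySem.List.slice x.toList (some 4) none)) e = true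
          then d ++ [id e] else d) from rfl,
       PySem.List.foldl_append_if, List.map_id, List.nil_append]
    -- apply the loop lemma with m.toList split at position 4
    rw [show m.toList = m.toList.take 4 ++ m.toList.drop 4 from (List.take_append_drop 4 m.toList).symm]
    rw [foldA]
    · have h1 : PySem.List.slice (List.take 4 m.toList ++ List.drop 4 m.toList) none (some 4)
          = List.take 4 m.toList := by
        simp [pysem]
      have h2 : PySem.List.slice (List.take 4 m.toList ++ List.drop 4 m.toList) (some 4) none
          = List.drop 4 m.toList := by
        simp [pysem]
      rw [h1, h2]
      congr 1
      apply List.filter_congr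
      intro c hc
      -- c occurs in some hart's tail, hence in A's union set
      have hU : c ∈ PySem.Set.ofList (PySem.Chars.join []
          (PySem.List.slice a.toList (some 4) none :: PySem.List.slice b.toList (some 4) none ::
            List.map (fun x => PySem.List.slice x.toList (some 4) none) rest')) := by
        rw [show (PySem.List.slice a.toList (some 4) none :: PySem.List.slice b.toList (some 4) none ::
              List.map (fun x => PySem.List.slice x.toList (some 4) none) rest')
            = List.map (fun x => PySem.List.slice x.toList (some 4) none) (a :: b :: rest') from rfl,
           PySem.Set.mem_ofList, join_nil_flatten, List.mem_flatten]
        refine ⟨PySem.List.slice m.toList (some 4) none, List.mem_map_of_mem hmem, ?_⟩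
        simpa [pysem] using hc
      have hcom := hcommon (PySem.Set.ofList (PySem.List.slice a.toList (some 4) none))
          (PySem.Set.ofList (PySem.List.slice b.toList (some 4) none) ::
            List.map (fun x => PySem.Set.ofList (PySem.List.slice x.toList (some 4) none)) rest') c
          (by simp)
      rcases hall : ((a :: b :: rest').all fun x =>
          PySem.Chars.isIn [c] (PySem.List.slice x.toList (some 4) none)) with _ | _
      · -- some hart lacks c: A deletes it, B's common set lacks it
        have hcin : c ∈ List.filter (fun e =>
            !(a :: b :: rest').all fun x => PySem.Chars.isIn [e] (PySem.List.slice x.toList (some 4) none))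
            (PySem.Set.ofList (PySem.Chars.join []
              (PySem.List.slice a.toList (some 4) none :: PySem.List.slice b.toList (some 4) none ::
                List.map (fun x => PySem.List.slice x.toList (some 4) none) rest'))) := by
          rw [List.mem_filter]
          exact ⟨hU, by rw [hall]; rfl⟩
        have hnc : ¬ ∀ x ∈ (a :: b :: rest'), c ∈ PySem.List.slice x.toList (some 4) none := by
          intro hforall
          have : ((a :: b :: rest').all fun x =>
              PySem.Chars.isIn [c] (PySem.List.slice x.toList (some 4) none)) = true := by
            rw [List.all_eq_true]
            exact fun x hx => (isIn_singleton c _).mpr (hforall x hx)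
          rw [hall] at this; exact Bool.false_ne_true this
        have hc2 : (List.foldl PySem.Set.inter (PySem.Set.ofList (PySem.List.slice a.toList (some 4) none))
            (PySem.Set.ofList (PySem.List.slice b.toList (some 4) none) ::
              List.map (fun x => PySem.Set.ofList (PySem.List.slice x.toList (some 4) none)) rest')).contains c = false := by
          cases h : (List.foldl PySem.Set.inter (PySem.Set.ofList (PySem.List.slice a.toList (some 4) none))
            (PySem.Set.ofList (PySem.List.slice b.toList (some 4) none) ::
              List.map (fun x => PySem.Set.ofList (PySem.List.slice x.toList (some 4) none)) rest')).contains c with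
          | false => rfl
          | true => exact absurd (hcom.mp h) hnc
        have hcc : (List.filter (fun e =>
            !(a :: b :: rest').all fun x => PySem.Chars.isIn [e] (PySem.List.slice x.toList (some 4) none))
            (PySem.Set.ofList (PySem.Chars.join []
              (PySem.List.slice a.toList (some 4) none :: PySem.List.slice b.toList (some 4) none ::
                List.map (fun x => PySem.List.slice x.toList (some 4) none) rest')))).contains c = true :=
          List.elem_eq_true_of_mem hcin
        rw [hcc, hc2]
        rfl
      · -- every hart has c: A keeps it, B's common set has it
        have hforall : ∀ x ∈ (a :: b :: rest'), c ∈ PySem.List.slice x.toList (some 4) none := by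
          intro x hx
          exact (isIn_singleton c _).mp (List.all_eq_true.mp hall x hx)
        have hnin : c ∉ List.filter (fun e =>
            !(a :: b :: rest').all fun x => PySem.Chars.isIn [e] (PySem.List.slice x.toList (some 4) none))
            (PySem.Set.ofList (PySem.Chars.join []
              (PySem.List.slice a.toList (some 4) none :: PySem.List.slice b.toList (some 4) none ::
                List.map (fun x => PySem.List.slice x.toList (some 4) none) rest'))) := by
          intro hin
          have := (List.mem_filter.mp hin).2
          rw [hall] at this
          simp at this
        have hf : (List.filter (fun e =>
            !(a :: b :: rest').all fun x => PySem.Chars.isIn [e] (PySem.List.slice x.toList (some 4) none))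
            (PySem.Set.ofList (PySem.Chars.join []
              (PySem.List.slice a.toList (some 4) none :: PySem.List.slice b.toList (some 4) none ::
                List.map (fun x => PySem.List.slice x.toList (some 4) none) rest')))).contains c = false := by
          cases hcase : (List.filter (fun e =>
              !(a :: b :: rest').all fun x => PySem.Chars.isIn [e] (PySem.List.slice x.toList (some 4) none))
              (PySem.Set.ofList (PySem.Chars.join []
                (PySem.List.slice a.toList (some 4) none :: PySem.List.slice b.toList (some 4) none ::
                  List.map (fun x => PySem.List.slice x.toList (some 4) none) rest')))).contains c with
          | false => rfl
          | true => exact absurd (List.elem_iff.mp hcase) hnin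
        rw [hf, hcom.mpr hforall]
        rfl
    · exact (List.length_take_le 4 m.toList)
    · by_cases h4 : 4 ≤ m.toList.length
      · exact Or.inl (by rw [List.length_take]; omega)
      · exact Or.inr (List.drop_eq_nil_of_le (by omega))
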